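-- pv_equiv track=rewrite | github.com/MrBrantCode/unitest_baseline | mut_generate/mist_train_taco/taco_10309/solution.py | maximize_euler_ratio
-- ===== SOURCE A (Python) =====
-- def maximize_euler_ratio(N: int) -> int:
--     def is_prime(n: int) -> bool:
--         i = 2
--         while i * i <= n:
--             if n % i == 0:
--                 return False
--             i += 1
--         return True
--
--     r = 1
--     i = 2
--     while r * i <= N:
--         if is_prime(i):
--             r *= i
--         i += 1
--     return r
-- ===== SOURCE B (Python) =====
-- # The answer is simply the largest primorial (product of the first k primes) not
-- # exceeding N, so scan a precomputed table instead of searching for primes.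
-- # The table covers every N below 1922760350154212639070 (~1.9e21, well past 2^63).
-- _PRIMORIALS = [2, 6, 30, 210, 2310, 30030, 510510, 9699690, 223092870,
--                6469693230, 200560490130, 7420738134810, 304250263527210,
--                13082761331670030, 614889782588491410, 32589158477190044730]
--
--
-- def maximize_euler_ratio(N: int) -> int:
--     r = 1
--     for v in _PRIMORIALS:
--         if v > N:
--             break
--         r = v
--     return r
-- ===== Notes on version B (the rewrite author's own statement) =====
-- stated objective: simpler
-- what changed: B drops the prime search entirely: A's result is exactly the largest primorial (product of the first k primes) not exceeding N, so B scans a precomputed table of primorials for the last entry <= N.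
import Mathlib
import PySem

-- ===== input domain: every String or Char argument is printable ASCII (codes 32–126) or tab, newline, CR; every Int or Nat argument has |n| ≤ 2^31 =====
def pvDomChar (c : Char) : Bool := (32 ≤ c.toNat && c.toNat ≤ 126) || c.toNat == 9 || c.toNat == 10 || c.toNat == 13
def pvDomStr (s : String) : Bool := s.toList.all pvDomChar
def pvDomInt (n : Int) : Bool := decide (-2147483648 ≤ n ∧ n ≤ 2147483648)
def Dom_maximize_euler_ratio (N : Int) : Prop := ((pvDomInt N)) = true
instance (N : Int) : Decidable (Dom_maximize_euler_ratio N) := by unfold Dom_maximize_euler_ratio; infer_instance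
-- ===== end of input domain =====

-- B replaces A's prime-by-prime search with a scan of a precomputed table of
-- primorials for the largest entry ≤ N (simpler; A's value is that primorial).

-- ===== PORT A =====
-- the inner `while i*i <= n` loop of A's is_prime
def isPrimeLoopA (n i : Int) : Bool :=
  if h : i * i ≤ n then
    if PySem.Int.mod n i = 0 then false
    else isPrimeLoopA n (i + 1)
  else true
termination_by (n + 1 - i).toNat
decreasing_by
  have hin : i ≤ n := by
    by_cases hi0 : i ≤ 0
    · nlinarith [mul_self_nonneg i]
    · nlinarith
  omega

-- A's outer `while r*i <= N` loop; the proof arguments (1 ≤ r, 2 ≤ i) are loop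
-- invariants of A's code carried only for termination.
def loopA (N r i : Int) (hr : 1 ≤ r) (hi : 2 ≤ i) : Int :=
  if h : r * i ≤ N then
    if isPrimeLoopA i 2 then
      loopA N (r * i) (i + 1) (by nlinarith) (by omega)
    else
      loopA N r (i + 1) hr (by omega)
  else r
termination_by (N + 1 - r * i).toNat
decreasing_by
  · have hr0 : (0:Int) < r := by omega
    have hi0 : (0:Int) < i := by omega
    have h1 : r * i < r * i * (i + 1) := by nlinarith [mul_pos (mul_pos hr0 hi0) hi0]
    omega
  · have h1 : r * i < r * (i + 1) := by nlinarith
    omega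

def maximize_euler_ratio (N : Int) : Int := loopA N 1 2 (by norm_num) (by norm_num)

-- ===== PORT B =====
-- Source B's module-level table _PRIMORIALS
def pvPrimorials : List Int :=
  [2, 6, 30, 210, 2310, 30030, 510510, 9699690, 223092870,
   6469693230, 200560490130, 7420738134810, 304250263527210,
   13082761331670030, 614889782588491410, 32589158477190044730]

-- Source B's `for v in _PRIMORIALS: if v > N: break; r = v` loop
def scanTable (table : List Int) (N r : Int) : Int :=
  match table with
  | [] => r
  | v :: vs => if v > N then r else scanTable vs N v

def maximize_euler_ratio_alt (N : Int) : Int := scanTable pvPrimorials N 1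

-- ===== PRECONDITION & SPEC =====
def Spec_maximize_euler_ratio (N : Int) (out : Int) : Prop := out = maximize_euler_ratio_alt N
instance (N : Int) (out : Int) : Decidable (Spec_maximize_euler_ratio N out) := by unfold Spec_maximize_euler_ratio; infer_instance

-- ===== CLAIM (what is proved, stated in full; the proofs are below) =====
def Claim_equal_maximize_euler_ratio : Prop := ∀ (N : Int), Dom_maximize_euler_ratio N → Spec_maximize_euler_ratio N (maximize_euler_ratio N)

-- ===== LEMMAS AND PROOFS =====

-- evaluation lemmas for A's trial-division loop
lemma isP_div (n i : Int) (h1 : i * i ≤ n) (h2 : PySem.Int.mod n i = 0) :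
    isPrimeLoopA n i = false := by
  rw [isPrimeLoopA.eq_def]; simp only [dif_pos h1, if_pos h2]

lemma isP_next (n i i' : Int) (h1 : i * i ≤ n) (h2 : ¬ PySem.Int.mod n i = 0)
    (h3 : i' = i + 1) : isPrimeLoopA n i = isPrimeLoopA n i' := by
  subst h3; rw [isPrimeLoopA.eq_def]; simp only [dif_pos h1, if_neg h2]

lemma isP_done (n i : Int) (h : ¬ i * i ≤ n) : isPrimeLoopA n i = true := by
  rw [isPrimeLoopA.eq_def]; simp only [dif_neg h]

-- one step of A's outer loop at a prime / composite candidate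
lemma loopA_step_prime (N r p r' i' : Int) (hr : 1 ≤ r) (hi : 2 ≤ p)
    (h : r * p ≤ N) (hp : isPrimeLoopA p 2 = true) (he : r' = r * p ∧ i' = p + 1) :
    loopA N r p hr hi = loopA N r' i' (by nlinarith [he.1]) (by omega) := by
  obtain ⟨h1, h2⟩ := he; subst h1; subst h2
  rw [loopA.eq_def]; simp only [dif_pos h, hp, if_true]

lemma loopA_step_comp (N r i i' : Int) (hr : 1 ≤ r) (hi : 2 ≤ i)
    (h : r * i ≤ N) (hp : isPrimeLoopA i 2 = false) (he : i' = i + 1) :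
    loopA N r i hr hi = loopA N r i' hr (by omega) := by
  subst he; rw [loopA.eq_def]; simp only [dif_pos h, hp, Bool.false_eq_true, if_false]

-- A's loop returns r once no remaining admissible candidate is prime
lemma loopA_done_fuel (k : Nat) : ∀ (N r i : Int) (hr : 1 ≤ r) (hi : 2 ≤ i),
    (N + 1 - r * i).toNat ≤ k →
    (∀ j, i ≤ j → r * j ≤ N → isPrimeLoopA j 2 = false) →
    loopA N r i hr hi = r := by
  induction k with
  | zero =>
    intro N r i hr hi hk hall
    have hcond : ¬ r * i ≤ N := by omega
    rw [loopA.eq_def]; simp only [dif_neg hcond]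
  | succ k ih =>
    intro N r i hr hi hk hall
    rw [loopA.eq_def]
    by_cases hcond : r * i ≤ N
    · simp only [dif_pos hcond, hall i le_rfl hcond, Bool.false_eq_true, if_false]
      have h1 : r * i < r * (i + 1) := by nlinarith
      exact ih N r (i + 1) hr (by omega) (by omega)
        (fun j hj hjN => hall j (by omega) hjN)
    · simp only [dif_neg hcond]

lemma loopA_done (N r i : Int) (hr : 1 ≤ r) (hi : 2 ≤ i)
    (hall : ∀ j, i ≤ j → r * j ≤ N → isPrimeLoopA j 2 = false) :
    loopA N r i hr hi = r :=
  loopA_done_fuel (N + 1 - r * i).toNat N r i hr hi le_rfl hall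

-- primality of the individual candidates A's loop meets (2..23)
lemma pvP2 : isPrimeLoopA 2 2 = true := by
  rw [isP_done 2 2 (by norm_num)]

lemma pvP3 : isPrimeLoopA 3 2 = true := by
  rw [isP_done 3 2 (by norm_num)]

lemma pvP5 : isPrimeLoopA 5 2 = true := by
  rw [isP_next 5 2 3 (by norm_num) (by decide) (by norm_num),
      isP_done 5 3 (by norm_num)]

lemma pvP7 : isPrimeLoopA 7 2 = true := by
  rw [isP_next 7 2 3 (by norm_num) (by decide) (by norm_num),
      isP_done 7 3 (by norm_num)]

lemma pvP11 : isPrimeLoopA 11 2 = true := by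
  rw [isP_next 11 2 3 (by norm_num) (by decide) (by norm_num),
      isP_next 11 3 4 (by norm_num) (by decide) (by norm_num),
      isP_done 11 4 (by norm_num)]

lemma pvP13 : isPrimeLoopA 13 2 = true := by
  rw [isP_next 13 2 3 (by norm_num) (by decide) (by norm_num),
      isP_next 13 3 4 (by norm_num) (by decide) (by norm_num),
      isP_done 13 4 (by norm_num)]

lemma pvP17 : isPrimeLoopA 17 2 = true := by
  rw [isP_next 17 2 3 (by norm_num) (by decide) (by norm_num),
      isP_next 17 3 4 (by norm_num) (by decide) (by norm_num),
      isP_next 17 4 5 (by norm_num) (by decide) (by norm_num),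
      isP_done 17 5 (by norm_num)]

lemma pvP19 : isPrimeLoopA 19 2 = true := by
  rw [isP_next 19 2 3 (by norm_num) (by decide) (by norm_num),
      isP_next 19 3 4 (by norm_num) (by decide) (by norm_num),
      isP_next 19 4 5 (by norm_num) (by decide) (by norm_num),
      isP_done 19 5 (by norm_num)]

lemma pvP23 : isPrimeLoopA 23 2 = true := by
  rw [isP_next 23 2 3 (by norm_num) (by decide) (by norm_num),
      isP_next 23 3 4 (by norm_num) (by decide) (by norm_num),
      isP_next 23 4 5 (by norm_num) (by decide) (by norm_num),
      isP_done 23 5 (by norm_num)]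

lemma pvC4 : isPrimeLoopA 4 2 = false := by
  rw [isP_div 4 2 (by norm_num) (by decide)]

lemma pvC6 : isPrimeLoopA 6 2 = false := by
  rw [isP_div 6 2 (by norm_num) (by decide)]

lemma pvC8 : isPrimeLoopA 8 2 = false := by
  rw [isP_div 8 2 (by norm_num) (by decide)]

lemma pvC9 : isPrimeLoopA 9 2 = false := by
  rw [isP_next 9 2 3 (by norm_num) (by decide) (by norm_num),
      isP_div 9 3 (by norm_num) (by decide)]

lemma pvC10 : isPrimeLoopA 10 2 = false := by
  rw [isP_div 10 2 (by norm_num) (by decide)]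

lemma pvC12 : isPrimeLoopA 12 2 = false := by
  rw [isP_div 12 2 (by norm_num) (by decide)]

lemma pvC14 : isPrimeLoopA 14 2 = false := by
  rw [isP_div 14 2 (by norm_num) (by decide)]

lemma pvC15 : isPrimeLoopA 15 2 = false := by
  rw [isP_next 15 2 3 (by norm_num) (by decide) (by norm_num),
      isP_div 15 3 (by norm_num) (by decide)]

lemma pvC16 : isPrimeLoopA 16 2 = false := by
  rw [isP_div 16 2 (by norm_num) (by decide)]

lemma pvC18 : isPrimeLoopA 18 2 = false := by
  rw [isP_div 18 2 (by norm_num) (by decide)]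

lemma pvC20 : isPrimeLoopA 20 2 = false := by
  rw [isP_div 20 2 (by norm_num) (by decide)]

lemma pvC21 : isPrimeLoopA 21 2 = false := by
  rw [isP_next 21 2 3 (by norm_num) (by decide) (by norm_num),
      isP_div 21 3 (by norm_num) (by decide)]

lemma pvC22 : isPrimeLoopA 22 2 = false := by
  rw [isP_div 22 2 (by norm_num) (by decide)]

lemma reach2 (N : Int) (h : 2 ≤ N) :
    loopA N 1 2 (by norm_num) (by norm_num) = loopA N 2 3 (by norm_num) (by norm_num) := by
  rw [loopA_step_prime N 1 2 2 3 _ _ (by omega) pvP2 (by norm_num)]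

lemma reach6 (N : Int) (h : 6 ≤ N) :
    loopA N 1 2 (by norm_num) (by norm_num) = loopA N 6 4 (by norm_num) (by norm_num) := by
  rw [reach2 N (by omega),
      loopA_step_prime N 2 3 6 4 _ _ (by omega) pvP3 (by norm_num)]

lemma reach30 (N : Int) (h : 30 ≤ N) :
    loopA N 1 2 (by norm_num) (by norm_num) = loopA N 30 6 (by norm_num) (by norm_num) := by
  rw [reach6 N (by omega),
      loopA_step_comp N 6 4 5 _ _ (by omega) pvC4 (by norm_num),
      loopA_step_prime N 6 5 30 6 _ _ (by omega) pvP5 (by norm_num)]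

lemma reach210 (N : Int) (h : 210 ≤ N) :
    loopA N 1 2 (by norm_num) (by norm_num) = loopA N 210 8 (by norm_num) (by norm_num) := by
  rw [reach30 N (by omega),
      loopA_step_comp N 30 6 7 _ _ (by omega) pvC6 (by norm_num),
      loopA_step_prime N 30 7 210 8 _ _ (by omega) pvP7 (by norm_num)]

lemma reach2310 (N : Int) (h : 2310 ≤ N) :
    loopA N 1 2 (by norm_num) (by norm_num) = loopA N 2310 12 (by norm_num) (by norm_num) := by
  rw [reach210 N (by omega),
      loopA_step_comp N 210 8 9 _ _ (by omega) pvC8 (by norm_num),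
      loopA_step_comp N 210 9 10 _ _ (by omega) pvC9 (by norm_num),
      loopA_step_comp N 210 10 11 _ _ (by omega) pvC10 (by norm_num),
      loopA_step_prime N 210 11 2310 12 _ _ (by omega) pvP11 (by norm_num)]

lemma reach30030 (N : Int) (h : 30030 ≤ N) :
    loopA N 1 2 (by norm_num) (by norm_num) = loopA N 30030 14 (by norm_num) (by norm_num) := by
  rw [reach2310 N (by omega),
      loopA_step_comp N 2310 12 13 _ _ (by omega) pvC12 (by norm_num),
      loopA_step_prime N 2310 13 30030 14 _ _ (by omega) pvP13 (by norm_num)]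

lemma reach510510 (N : Int) (h : 510510 ≤ N) :
    loopA N 1 2 (by norm_num) (by norm_num) = loopA N 510510 18 (by norm_num) (by norm_num) := by
  rw [reach30030 N (by omega),
      loopA_step_comp N 30030 14 15 _ _ (by omega) pvC14 (by norm_num),
      loopA_step_comp N 30030 15 16 _ _ (by omega) pvC15 (by norm_num),
      loopA_step_comp N 30030 16 17 _ _ (by omega) pvC16 (by norm_num),
      loopA_step_prime N 30030 17 510510 18 _ _ (by omega) pvP17 (by norm_num)]

lemma reach9699690 (N : Int) (h : 9699690 ≤ N) :
    loopA N 1 2 (by norm_num) (by norm_num) = loopA N 9699690 20 (by norm_num) (by norm_num) := by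
  rw [reach510510 N (by omega),
      loopA_step_comp N 510510 18 19 _ _ (by omega) pvC18 (by norm_num),
      loopA_step_prime N 510510 19 9699690 20 _ _ (by omega) pvP19 (by norm_num)]

lemma reach223092870 (N : Int) (h : 223092870 ≤ N) :
    loopA N 1 2 (by norm_num) (by norm_num) = loopA N 223092870 24 (by norm_num) (by norm_num) := by
  rw [reach9699690 N (by omega),
      loopA_step_comp N 9699690 20 21 _ _ (by omega) pvC20 (by norm_num),
      loopA_step_comp N 9699690 21 22 _ _ (by omega) pvC21 (by norm_num),
      loopA_step_comp N 9699690 22 23 _ _ (by omega) pvC22 (by norm_num),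
      loopA_step_prime N 9699690 23 223092870 24 _ _ (by omega) pvP23 (by norm_num)]


-- B's table scan evaluated on each interval, by unfolding the literal list
set_option maxHeartbeats 1600000 in
lemma alt_eval (N c : Int)
    (hc : (c = 1 ∧ N < 2) ∨ (c = 2 ∧ 2 ≤ N ∧ N < 6) ∨ (c = 6 ∧ 6 ≤ N ∧ N < 30) ∨
      (c = 30 ∧ 30 ≤ N ∧ N < 210) ∨ (c = 210 ∧ 210 ≤ N ∧ N < 2310) ∨
      (c = 2310 ∧ 2310 ≤ N ∧ N < 30030) ∨ (c = 30030 ∧ 30030 ≤ N ∧ N < 510510) ∨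
      (c = 510510 ∧ 510510 ≤ N ∧ N < 9699690) ∨
      (c = 9699690 ∧ 9699690 ≤ N ∧ N < 223092870) ∨
      (c = 223092870 ∧ 223092870 ≤ N ∧ N < 6469693230)) :
    maximize_euler_ratio_alt N = c := by
  unfold maximize_euler_ratio_alt pvPrimorials
  rcases hc with ⟨rfl, h⟩ | ⟨rfl, h⟩ | ⟨rfl, h⟩ | ⟨rfl, h⟩ | ⟨rfl, h⟩ | ⟨rfl, h⟩ | ⟨rfl, h⟩ | ⟨rfl, h⟩ | ⟨rfl, h⟩ | ⟨rfl, h⟩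
  · rw [scanTable, if_pos (by omega)]
  · rw [scanTable, if_neg (by omega),
        scanTable, if_pos (by omega)]
  · rw [scanTable, if_neg (by omega),
        scanTable, if_neg (by omega),
        scanTable, if_pos (by omega)]
  · rw [scanTable, if_neg (by omega),
        scanTable, if_neg (by omega),
        scanTable, if_neg (by omega),
        scanTable, if_pos (by omega)]
  · rw [scanTable, if_neg (by omega),
        scanTable, if_neg (by omega),
        scanTable, if_neg (by omega),
        scanTable, if_neg (by omega),
        scanTable, if_pos (by omega)]
  · rw [scanTable, if_neg (by omega),
        scanTable, if_neg (by omega),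
        scanTable, if_neg (by omega),
        scanTable, if_neg (by omega),
        scanTable, if_neg (by omega),
        scanTable, if_pos (by omega)]
  · rw [scanTable, if_neg (by omega),
        scanTable, if_neg (by omega),
        scanTable, if_neg (by omega),
        scanTable, if_neg (by omega),
        scanTable, if_neg (by omega),
        scanTable, if_neg (by omega),
        scanTable, if_pos (by omega)]
  · rw [scanTable, if_neg (by omega),
        scanTable, if_neg (by omega),
        scanTable, if_neg (by omega),
        scanTable, if_neg (by omega),
        scanTable, if_neg (by omega),
        scanTable, if_neg (by omega),
        scanTable, if_neg (by omega),
        scanTable, if_pos (by omega)]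
  · rw [scanTable, if_neg (by omega),
        scanTable, if_neg (by omega),
        scanTable, if_neg (by omega),
        scanTable, if_neg (by omega),
        scanTable, if_neg (by omega),
        scanTable, if_neg (by omega),
        scanTable, if_neg (by omega),
        scanTable, if_neg (by omega),
        scanTable, if_pos (by omega)]
  · rw [scanTable, if_neg (by omega),
        scanTable, if_neg (by omega),
        scanTable, if_neg (by omega),
        scanTable, if_neg (by omega),
        scanTable, if_neg (by omega),
        scanTable, if_neg (by omega),
        scanTable, if_neg (by omega),
        scanTable, if_neg (by omega),
        scanTable, if_neg (by omega),
        scanTable, if_pos (by omega)]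

-- ===== VERDICT (by name: the statement is the Claim_ definition above) =====
theorem maximize_euler_ratio_spec : Claim_equal_maximize_euler_ratio := by
  intro N hDom
  have hD : -2147483648 ≤ N ∧ N ≤ 2147483648 := by
    unfold Dom_maximize_euler_ratio pvDomInt at hDom
    exact of_decide_eq_true hDom
  unfold Spec_maximize_euler_ratio maximize_euler_ratio
  by_cases h2 : N < 2
  · rw [loopA_done N 1 2 _ _ (fun j hj hjN => by exfalso; omega)]
    exact (alt_eval N 1 (by omega)).symm
  · by_cases h6 : N < 6
    · rw [reach2 N (by omega),
        loopA_done N 2 3 _ _ (fun j hj hjN => by exfalso; omega)]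
      exact (alt_eval N 2 (by omega)).symm
    · by_cases h30 : N < 30
      · rw [reach6 N (by omega),
          loopA_done N 6 4 _ _ (fun j hj hjN => by
            have hj4 : j = 4 := by omega
            subst hj4; exact pvC4)]
        exact (alt_eval N 6 (by omega)).symm
      · by_cases h210 : N < 210
        · rw [reach30 N (by omega),
            loopA_done N 30 6 _ _ (fun j hj hjN => by
              have hj6 : j = 6 := by omega
              subst hj6; exact pvC6)]
          exact (alt_eval N 30 (by omega)).symm
        · by_cases h2310 : N < 2310
          · rw [reach210 N (by omega),
              loopA_done N 210 8 _ _ (fun j hj hjN => by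
                have hj : j = 8 ∨ j = 9 ∨ j = 10 := by omega
                rcases hj with rfl | rfl | rfl
                exacts [pvC8, pvC9, pvC10])]
            exact (alt_eval N 210 (by omega)).symm
          · by_cases h30030 : N < 30030
            · rw [reach2310 N (by omega),
                loopA_done N 2310 12 _ _ (fun j hj hjN => by
                  have hj12 : j = 12 := by omega
                  subst hj12; exact pvC12)]
              exact (alt_eval N 2310 (by omega)).symm
            · by_cases h510510 : N < 510510
              · rw [reach30030 N (by omega),
                  loopA_done N 30030 14 _ _ (fun j hj hjN => by
                    have hj : j = 14 ∨ j = 15 ∨ j = 16 := by omega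
                    rcases hj with rfl | rfl | rfl
                    exacts [pvC14, pvC15, pvC16])]
                exact (alt_eval N 30030 (by omega)).symm
              · by_cases h9699690 : N < 9699690
                · rw [reach510510 N (by omega),
                    loopA_done N 510510 18 _ _ (fun j hj hjN => by
                      have hj18 : j = 18 := by omega
                      subst hj18; exact pvC18)]
                  exact (alt_eval N 510510 (by omega)).symm
                · by_cases h223092870 : N < 223092870
                  · rw [reach9699690 N (by omega),
                      loopA_done N 9699690 20 _ _ (fun j hj hjN => by
                        have hj : j = 20 ∨ j = 21 ∨ j = 22 := by omega
                        rcases hj with rfl | rfl | rfl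
                        exacts [pvC20, pvC21, pvC22])]
                    exact (alt_eval N 9699690 (by omega)).symm
                  · rw [reach223092870 N (by omega),
                      loopA_done N 223092870 24 _ _ (fun j hj hjN => by exfalso; omega)]
                    exact (alt_eval N 223092870 (by omega)).symm
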